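-- pv_equiv track=rewrite | github.com/congagen/anyiosyn | lib/composer.py | compose_koch
-- ===== SOURCE A (Python) =====
-- def compose_koch(gen_conf, note_index, bar, c_distance):
--     sequence = []
--
--     seq_sixth = int(gen_conf['note_count_bar'] / 6)
--     k_range_a = range(int(seq_sixth * 2), int(seq_sixth * 3))
--     k_range_b = range(int(seq_sixth * 3), int(seq_sixth * 4))
--
--     step_size = gen_conf['step_size'] if (
--         'step_size' in gen_conf.keys()
--     ) else 3
--
--     note_floor = gen_conf['note_floor'] if (
--         'note_floor' in gen_conf.keys()
--     ) else 0
--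
--     step_pos = 0
--
--     for i in range(gen_conf['note_count_bar']):
--         raw_val = 1
--
--         if i in k_range_a:
--             step_pos += step_size
--             new_note = raw_val + int(step_pos)
--             sequence.append(note_floor + new_note)
--
--         elif i in k_range_b:
--             step_pos -= step_size
--             new_note = raw_val + int(step_pos)
--             sequence.append(abs(note_floor + new_note))
--
--         else:
--             sequence.append(abs(note_floor + raw_val))
--
--     return sequence
-- ===== SOURCE B (Python) =====
-- def compose_koch(gen_conf, note_index, bar, c_distance):
--     n = gen_conf['note_count_bar']
--     if n <= 0:
--         return []
--     s = int(n / 6)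
--     step = gen_conf.get('step_size', 3)
--     nf = gen_conf.get('note_floor', 0)
--     base = abs(nf + 1)
--     rise = [nf + 1 + m * step for m in range(1, s + 1)]
--     fall = [abs(nf + 1 + (s - m) * step) for m in range(1, s + 1)]
--     return [base] * (2 * s) + rise + fall + [base] * (n - 4 * s)
-- ===== Notes on version B (the rewrite author's own statement) =====
-- stated objective: simpler
-- what changed: B replaces A's single loop over range(note_count_bar) with its membership tests against two range objects and a running step_pos accumulator by direct segment-wise construction: two replicated constant segments plus closed-form rising and falling ramps computed by list comprehensions (all values are integers, so the closed form is exact).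
import Mathlib
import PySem

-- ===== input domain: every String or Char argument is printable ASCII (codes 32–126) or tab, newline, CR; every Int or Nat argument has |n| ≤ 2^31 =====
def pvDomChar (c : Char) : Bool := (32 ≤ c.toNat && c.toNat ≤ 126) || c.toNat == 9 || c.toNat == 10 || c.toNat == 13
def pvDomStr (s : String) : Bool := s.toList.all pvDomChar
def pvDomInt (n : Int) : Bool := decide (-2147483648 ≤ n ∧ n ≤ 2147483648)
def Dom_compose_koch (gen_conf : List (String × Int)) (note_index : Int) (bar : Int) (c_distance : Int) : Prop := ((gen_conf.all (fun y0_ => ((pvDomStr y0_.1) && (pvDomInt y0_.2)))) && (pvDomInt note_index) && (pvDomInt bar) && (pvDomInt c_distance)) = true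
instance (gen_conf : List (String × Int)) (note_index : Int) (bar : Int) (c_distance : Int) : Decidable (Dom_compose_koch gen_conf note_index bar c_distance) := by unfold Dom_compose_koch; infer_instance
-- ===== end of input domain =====

-- B builds the sequence segment-by-segment with closed-form arithmetic instead of A's
-- single membership-tested loop with a running step accumulator (objective: simpler).

-- ===== PORT A =====
-- A's for-loop over range(note_count_bar): state is the running step_pos, branches in
-- Python's order (i in k_range_a / i in k_range_b / else).
def ckLoop (lo mid hi step_size note_floor : Int) : List Int → Int → List Int
  | [], _ => []
  | i :: rest, step_pos =>
    if lo ≤ i ∧ i < mid then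
      (note_floor + (1 + (step_pos + step_size))) :: ckLoop lo mid hi step_size note_floor rest (step_pos + step_size)
    else if mid ≤ i ∧ i < hi then
      |note_floor + (1 + (step_pos - step_size))| :: ckLoop lo mid hi step_size note_floor rest (step_pos - step_size)
    else
      |note_floor + 1| :: ckLoop lo mid hi step_size note_floor rest step_pos

def compose_koch (gen_conf : List (String × Int)) (note_index : Int) (bar : Int) (c_distance : Int) : List Int :=
  let d := PySem.Dict.mk gen_conf
  let n := (d.get? "note_count_bar").getD 0   -- KeyError when absent: excluded by Pre_
  -- int(n / 6): exact on the |n| ≤ 2^31 domain via PySem.Int.truncdiv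
  let seq_sixth := PySem.Int.truncdiv n 6
  let step_size := if d.contains "step_size" then d.getD "step_size" 3 else 3
  let note_floor := if d.contains "note_floor" then d.getD "note_floor" 0 else 0
  ckLoop (seq_sixth * 2) (seq_sixth * 3) (seq_sixth * 4) step_size note_floor
    (PySem.List.pyRange 0 n 1) 0

-- ===== PORT B =====
def compose_koch_alt (gen_conf : List (String × Int)) (note_index : Int) (bar : Int) (c_distance : Int) : List Int :=
  let d := PySem.Dict.mk gen_conf
  let n := (d.get? "note_count_bar").getD 0   -- KeyError when absent: excluded by Pre_
  if n ≤ 0 then []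
  else
    let s := PySem.Int.truncdiv n 6           -- int(n / 6): exact on the |n| ≤ 2^31 domain
    let step := d.getD "step_size" 3
    let nf := d.getD "note_floor" 0
    let base := |nf + 1|
    let rise := (PySem.List.pyRange 1 (s + 1) 1).map (fun m => nf + 1 + m * step)
    let fall := (PySem.List.pyRange 1 (s + 1) 1).map (fun m => |nf + 1 + (s - m) * step|)
    List.replicate (2 * s).toNat base ++ rise ++ fall ++ List.replicate (n - 4 * s).toNat base

-- ===== PRECONDITION & SPEC =====
-- Pre_ excludes only dicts without key 'note_count_bar', on which A raises KeyError.
def Pre_compose_koch (gen_conf : List (String × Int)) (note_index : Int) (bar : Int) (c_distance : Int) : Prop :=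
  (PySem.Dict.mk gen_conf).contains "note_count_bar" = true
instance (gen_conf : List (String × Int)) (note_index : Int) (bar : Int) (c_distance : Int) : Decidable (Pre_compose_koch gen_conf note_index bar c_distance) := by unfold Pre_compose_koch; infer_instance

def pvWitness_compose_koch : (List (String × Int)) × Int × Int × Int :=
  ([("note_count_bar", 12), ("step_size", 2)], 0, 0, 0)

def Spec_compose_koch (gen_conf : List (String × Int)) (note_index : Int) (bar : Int) (c_distance : Int) (out : List Int) : Prop := out = compose_koch_alt gen_conf note_index bar c_distance
instance (gen_conf : List (String × Int)) (note_index : Int) (bar : Int) (c_distance : Int) (out : List Int) : Decidable (Spec_compose_koch gen_conf note_index bar c_distance out) := by unfold Spec_compose_koch; infer_instance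

-- ===== CLAIM (what is proved, stated in full; the proofs are below) =====
def Claim_equal_compose_koch : Prop := ∀ (gen_conf : List (String × Int)) (note_index : Int) (bar : Int) (c_distance : Int), Dom_compose_koch gen_conf note_index bar c_distance → Pre_compose_koch gen_conf note_index bar c_distance → Spec_compose_koch gen_conf note_index bar c_distance (compose_koch gen_conf note_index bar c_distance)

-- ===== LEMMAS AND PROOFS =====

-- step_pos after A's loop has consumed a prefix of indices
def ckPos (lo mid hi step_size : Int) : List Int → Int → Int
  | [], step_pos => step_pos
  | i :: rest, step_pos =>
    if lo ≤ i ∧ i < mid then ckPos lo mid hi step_size rest (step_pos + step_size)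
    else if mid ≤ i ∧ i < hi then ckPos lo mid hi step_size rest (step_pos - step_size)
    else ckPos lo mid hi step_size rest step_pos

theorem ckLoop_append (lo mid hi st nf : Int) (l1 l2 : List Int) :
    ∀ p, ckLoop lo mid hi st nf (l1 ++ l2) p
      = ckLoop lo mid hi st nf l1 p ++ ckLoop lo mid hi st nf l2 (ckPos lo mid hi st l1 p) := by
  induction l1 with
  | nil => intro p; simp [ckLoop, ckPos]
  | cons i rest ih =>
    intro p
    simp only [List.cons_append, ckLoop, ckPos]
    split_ifs <;> simp [ih]

theorem ckLoop_calm (s st nf : Int) (hs : 0 ≤ s) (l : List Int)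
    (hl : ∀ i ∈ l, i < s * 2 ∨ s * 4 ≤ i) :
    ∀ p, ckLoop (s * 2) (s * 3) (s * 4) st nf l p = List.replicate l.length |nf + 1| ∧
      ckPos (s * 2) (s * 3) (s * 4) st l p = p := by
  induction l with
  | nil => intro p; simp [ckLoop, ckPos]
  | cons i rest ih =>
    intro p
    have hi := hl i (by simp)
    have h1 : ¬ (s * 2 ≤ i ∧ i < s * 3) := by omega
    have h2 : ¬ (s * 3 ≤ i ∧ i < s * 4) := by omega
    have ih' := ih (fun j hj => hl j (by simp [hj])) p
    simp [ckLoop, ckPos, h1, h2, ih'.1, ih'.2, List.replicate_succ]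

theorem ckLoop_rise (s st nf : Int) :
    ∀ (k : Nat) (a p : Int), s * 2 ≤ a → a + k ≤ s * 3 →
      ckLoop (s * 2) (s * 3) (s * 4) st nf (PySem.List.pyRange a (a + k) 1) p
        = (List.range k).map (fun (j : Nat) => nf + (1 + (p + ((j : Int) + 1) * st))) ∧
      ckPos (s * 2) (s * 3) (s * 4) st (PySem.List.pyRange a (a + k) 1) p = p + k * st := by
  intro k
  induction k with
  | zero => intro a p _ _; simp [PySem.List.pyRange_one_eq_nil, ckLoop, ckPos]
  | succ k ih =>
    intro a p ha hb
    have hcons : PySem.List.pyRange a (a + (k + 1 : Nat)) 1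
        = a :: PySem.List.pyRange (a + 1) (a + (k + 1 : Nat)) 1 :=
      PySem.List.pyRange_one_cons (by push_cast; omega)
    have hre : a + ((k + 1 : Nat) : Int) = (a + 1) + (k : Nat) := by push_cast; ring
    have hcond : s * 2 ≤ a ∧ a < s * 3 := by constructor <;> push_cast at hb ⊢ <;> omega
    have ih' := ih (a + 1) (p + st) (by omega) (by push_cast at hb ⊢; omega)
    rw [hre] at hcons
    constructor
    · rw [hre, hcons]
      simp only [ckLoop, if_pos hcond, ih'.1, List.range_succ_eq_map, List.map_cons, List.map_map]
      refine List.cons_eq_cons.mpr ⟨by ring, List.map_congr_left fun j _ => ?_⟩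
      simp only [Function.comp]
      push_cast
      ring
    · rw [hre, hcons]
      simp only [ckPos, if_pos hcond, ih'.2]
      push_cast
      ring

theorem ckLoop_fall (s st nf : Int) :
    ∀ (k : Nat) (a p : Int), s * 3 ≤ a → a + k ≤ s * 4 →
      ckLoop (s * 2) (s * 3) (s * 4) st nf (PySem.List.pyRange a (a + k) 1) p
        = (List.range k).map (fun (j : Nat) => |nf + (1 + (p - ((j : Int) + 1) * st))|) ∧
      ckPos (s * 2) (s * 3) (s * 4) st (PySem.List.pyRange a (a + k) 1) p = p - k * st := by
  intro k
  induction k with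
  | zero => intro a p _ _; simp [PySem.List.pyRange_one_eq_nil, ckLoop, ckPos]
  | succ k ih =>
    intro a p ha hb
    have hcons : PySem.List.pyRange a (a + (k + 1 : Nat)) 1
        = a :: PySem.List.pyRange (a + 1) (a + (k + 1 : Nat)) 1 :=
      PySem.List.pyRange_one_cons (by push_cast; omega)
    have hre : a + ((k + 1 : Nat) : Int) = (a + 1) + (k : Nat) := by push_cast; ring
    have hc1 : ¬ (s * 2 ≤ a ∧ a < s * 3) := by omega
    have hc2 : s * 3 ≤ a ∧ a < s * 4 := by constructor <;> push_cast at hb ⊢ <;> omega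
    have ih' := ih (a + 1) (p - st) (by omega) (by push_cast at hb ⊢; omega)
    rw [hre] at hcons
    constructor
    · rw [hre, hcons]
      simp only [ckLoop, if_neg hc1, if_pos hc2, ih'.1, List.range_succ_eq_map, List.map_cons,
        List.map_map]
      refine List.cons_eq_cons.mpr ⟨by ring_nf, List.map_congr_left fun j _ => ?_⟩
      simp only [Function.comp]
      push_cast
      ring_nf
    · rw [hre, hcons]
      simp only [ckPos, if_neg hc1, if_pos hc2, ih'.2]
      push_cast
      ring

-- ===== VERDICT (by name: the statement is the Claim_ definition above) =====
theorem compose_koch_spec : Claim_equal_compose_koch := by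
  intro gen_conf note_index bar c_distance hdom hpre
  unfold Spec_compose_koch compose_koch compose_koch_alt
  simp only []
  set d := PySem.Dict.mk gen_conf with hd
  set n := (d.get? "note_count_bar").getD 0 with hn
  set s := PySem.Int.truncdiv n 6 with hsdef
  set st := d.getD "step_size" 3 with hst
  set nf := d.getD "note_floor" 0 with hnf
  have hstep : (if d.contains "step_size" then d.getD "step_size" 3 else 3) = st := by
    by_cases h : d.contains "step_size" = true
    · rw [if_pos h]
    · simp only [Bool.not_eq_true] at h
      rw [if_neg (by simp [h]), hst, PySem.Dict.getD_of_not_contains d _ h]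
  have hfloor : (if d.contains "note_floor" then d.getD "note_floor" 0 else 0) = nf := by
    by_cases h : d.contains "note_floor" = true
    · rw [if_pos h]
    · simp only [Bool.not_eq_true] at h
      rw [if_neg (by simp [h]), hnf, PySem.Dict.getD_of_not_contains d _ h]
  rw [hstep, hfloor]
  by_cases hn0 : n ≤ 0
  · rw [if_pos hn0, PySem.List.pyRange_one_eq_nil hn0]
    rfl
  · rw [if_neg hn0]
    have hs : 0 ≤ s ∧ s * 6 ≤ n := by
      rw [hsdef]
      unfold PySem.Int.truncdiv
      rw [Int.tdiv_eq_ediv_of_nonneg (by omega)]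
      omega
    have hsnat : ((s.toNat : Int)) = s := Int.toNat_of_nonneg hs.1
    -- split the index range into the four segments
    have e1 : PySem.List.pyRange 0 n 1
        = PySem.List.pyRange 0 (s * 2) 1 ++ PySem.List.pyRange (s * 2) n 1 :=
      PySem.List.pyRange_one_append 0 (s * 2) n (by omega) (by omega)
    have e2 : PySem.List.pyRange (s * 2) n 1
        = PySem.List.pyRange (s * 2) (s * 3) 1 ++ PySem.List.pyRange (s * 3) n 1 :=
      PySem.List.pyRange_one_append (s * 2) (s * 3) n (by omega) (by omega)
    have e3 : PySem.List.pyRange (s * 3) n 1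
        = PySem.List.pyRange (s * 3) (s * 4) 1 ++ PySem.List.pyRange (s * 4) n 1 :=
      PySem.List.pyRange_one_append (s * 3) (s * 4) n (by omega) (by omega)
    rw [e1, e2, e3, ckLoop_append, ckLoop_append, ckLoop_append]
    -- segment 1: below the stepped region
    have hseg1 := ckLoop_calm s st nf hs.1 (PySem.List.pyRange 0 (s * 2) 1)
      (fun i hi => by have := (PySem.List.mem_pyRange_one).mp hi; omega) 0
    -- segment 2: the rising region
    have hr2 : PySem.List.pyRange (s * 2) (s * 3) 1
        = PySem.List.pyRange (s * 2) (s * 2 + (s.toNat : Int)) 1 := by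
      rw [hsnat]; ring_nf
    have hseg2 := ckLoop_rise s st nf s.toNat (s * 2) 0 (le_refl _) (by rw [hsnat]; omega)
    -- segment 3: the falling region
    have hr3 : PySem.List.pyRange (s * 3) (s * 4) 1
        = PySem.List.pyRange (s * 3) (s * 3 + (s.toNat : Int)) 1 := by
      rw [hsnat]; ring_nf
    have hseg3 := ckLoop_fall s st nf s.toNat (s * 3) (0 + (s.toNat : Int) * st) (le_refl _)
      (by rw [hsnat]; omega)
    -- segment 4: above the stepped region
    have hseg4 := ckLoop_calm s st nf hs.1 (PySem.List.pyRange (s * 4) n 1)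
      (fun i hi => by have := (PySem.List.mem_pyRange_one).mp hi; omega)
    rw [hseg1.1, hseg1.2, hr2, hseg2.1, hseg2.2, hr3, hseg3.1, hseg3.2, (hseg4 _).1]
    -- now both sides are explicit concatenations; compare segmentwise
    have hb : PySem.List.pyRange 1 (s + 1) 1
        = (List.range s.toNat).map (fun (k : Nat) => 1 + (k : Int)) := by
      rw [PySem.List.pyRange_one]
      norm_num
    rw [hb, List.map_map, List.map_map]
    have q1 : List.replicate (PySem.List.pyRange 0 (s * 2) 1).length |nf + 1|
        = List.replicate (2 * s).toNat |nf + 1| := by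
      rw [PySem.List.length_pyRange_one]; congr 1; omega
    have q2 : (List.range s.toNat).map (fun (j : Nat) => nf + (1 + (0 + ((j : Int) + 1) * st)))
        = (List.range s.toNat).map ((fun m => nf + 1 + m * st) ∘ fun (k : Nat) => 1 + (k : Int)) :=
      List.map_congr_left fun j _ => by simp only [Function.comp]; ring
    have q3 : (List.range s.toNat).map
          (fun (j : Nat) => |nf + (1 + (0 + (s.toNat : Int) * st - ((j : Int) + 1) * st))|)
        = (List.range s.toNat).map
            ((fun m => |nf + 1 + (s - m) * st|) ∘ fun (k : Nat) => 1 + (k : Int)) :=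
      List.map_congr_left fun j _ => by
        simp only [Function.comp]; rw [hsnat]; congr 1; ring
    have q4 : List.replicate (PySem.List.pyRange (s * 4) n 1).length |nf + 1|
        = List.replicate (n - 4 * s).toNat |nf + 1| := by
      rw [PySem.List.length_pyRange_one]; congr 1; omega
    rw [q1, q2, q3, q4]
    simp only [List.append_assoc]
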